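-- pv_equiv track=rewrite | github.com/ReadJ777/Patents | TERNARY_PROTOTYPE/benchmark/energy_benchmark.py | ternary_decision_loop
-- ===== SOURCE A (Python) =====
-- def ternary_decision_loop(iterations):
--     """Ternary decision-making with PSI state deferral"""
--     errors = 0
--     decisions = 0
--     deferred = 0
--     for i in range(iterations):
--         confidence = (i * 17 + 31) % 100
--         # Ternary: can defer when uncertain
--         if confidence >= 70:
--             decision = 1
--             decisions += 1
--         elif confidence <= 30:
--             decision = 0
--             decisions += 1
--         else:
--             # PSI state - defer, no decision = no error
--             decision = 0.5
--             deferred += 1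
--     return decisions, errors, deferred
-- ===== SOURCE B (Python) =====
-- def _hit(i):
--     c = (i * 17 + 31) % 100
--     return c >= 70 or c <= 30
--
-- _FULL = sum(1 for i in range(100) if _hit(i))       # hits per full period of 100
-- _PREFIX = [0] * 101                                  # prefix counts of hits
-- for _i in range(100):
--     _PREFIX[_i + 1] = _PREFIX[_i] + (1 if _hit(_i) else 0)
--
-- def ternary_decision_loop(iterations):
--     """Ternary decision-making with PSI state deferral"""
--     errors = 0
--     n = iterations if iterations > 0 else 0
--     q, r = divmod(n, 100)
--     decisions = q * _FULL + _PREFIX[r]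
--     return decisions, errors, n - decisions
-- ===== Notes on version B (the rewrite author's own statement) =====
-- stated objective: faster
-- what changed: Replaced the per-iteration loop by a closed form: the confidence sequence is periodic, so decisions = (number of full periods) * (hits per period) + prefix[remainder] using a small precomputed prefix table, and deferred = n - decisions.
import Mathlib
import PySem

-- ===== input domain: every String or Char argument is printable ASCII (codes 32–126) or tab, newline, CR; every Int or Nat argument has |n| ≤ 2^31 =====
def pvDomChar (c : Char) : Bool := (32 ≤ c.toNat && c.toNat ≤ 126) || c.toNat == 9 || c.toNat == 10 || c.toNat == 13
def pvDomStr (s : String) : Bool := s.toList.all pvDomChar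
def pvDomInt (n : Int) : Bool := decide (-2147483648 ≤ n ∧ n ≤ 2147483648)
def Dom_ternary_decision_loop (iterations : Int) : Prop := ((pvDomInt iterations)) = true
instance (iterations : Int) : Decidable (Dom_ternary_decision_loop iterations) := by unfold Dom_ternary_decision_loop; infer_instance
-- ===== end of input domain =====

-- B replaces A's linear loop by a constant-time closed form exploiting the periodicity of the confidence sequence.

-- ===== PORT A =====
def ternary_decision_loop (iterations : Int) : List Int :=
  let s := (PySem.List.pyRange 0 iterations 1).foldl
    (fun (st : Int × Int × Int) i =>
      let confidence := PySem.Int.mod (i * 17 + 31) 100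
      if confidence ≥ 70 then (st.1, st.2.1 + 1, st.2.2)
      else if confidence ≤ 30 then (st.1, st.2.1 + 1, st.2.2)
      else (st.1, st.2.1, st.2.2 + 1))
    ((0 : Int), (0 : Int), (0 : Int))  -- (errors, decisions, deferred)
  [s.2.1, s.1, s.2.2]

-- ===== PORT B =====
def pvHit (i : Int) : Bool :=
  let c := PySem.Int.mod (i * 17 + 31) 100
  decide (c ≥ 70) || decide (c ≤ 30)

-- module-level precomputation in Source B: hits per full period, and prefix counts
def pvFull : Nat := ((PySem.List.pyRange 0 100 1).filter pvHit).length

def pvPrefix (r : Nat) : Nat := ((PySem.List.pyRange 0 (r : Int) 1).filter pvHit).length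

def ternary_decision_loop_alt (iterations : Int) : List Int :=
  let errors : Int := 0
  let n := if iterations > 0 then iterations else 0
  let q := PySem.Int.floordiv n 100
  let r := PySem.Int.mod n 100
  let decisions := q * (pvFull : Int) + (pvPrefix r.toNat : Int)
  [decisions, errors, n - decisions]

-- ===== PRECONDITION & SPEC =====
def Spec_ternary_decision_loop (iterations : Int) (out : List Int) : Prop := out = ternary_decision_loop_alt iterations
instance (iterations : Int) (out : List Int) : Decidable (Spec_ternary_decision_loop iterations out) := by unfold Spec_ternary_decision_loop; infer_instance

-- ===== CLAIM (what is proved, stated in full; the proofs are below) =====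
def Claim_equal_ternary_decision_loop : Prop := ∀ (iterations : Int), Dom_ternary_decision_loop iterations → Spec_ternary_decision_loop iterations (ternary_decision_loop iterations)

-- ===== LEMMAS AND PROOFS =====

-- number of hits among the first k confidences
def pvCnt (k : Nat) : Nat := (List.range k).countP (fun j => pvHit (j : Int))

theorem pvCnt_succ (k : Nat) : pvCnt (k + 1) = pvCnt k + (if pvHit (k : Int) then 1 else 0) := by
  by_cases h : pvHit (k : Int) <;>
    simp [pvCnt, List.range_succ, List.countP_append, h]

theorem pvHit_mod (m : Nat) : pvHit (m : Int) = pvHit ((m % 100 : Nat) : Int) := by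
  unfold pvHit
  have h : PySem.Int.mod ((m : Int) * 17 + 31) 100
      = PySem.Int.mod (((m % 100 : Nat) : Int) * 17 + 31) 100 := by
    rw [PySem.Int.mod_eq_emod_of_pos (by norm_num),
        PySem.Int.mod_eq_emod_of_pos (by norm_num)]
    omega
  simp only [h]

theorem pvPrefix_eq_cnt (r : Nat) : pvPrefix r = pvCnt r := by
  induction r with
  | zero => rfl
  | succ r ih =>
    have hstep : ((r : Nat) : Int) + 1 = (((r + 1 : Nat)) : Int) := by push_cast; ring
    have hr : PySem.List.pyRange 0 (((r + 1 : Nat)) : Int) 1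
        = PySem.List.pyRange 0 ((r : Nat) : Int) 1 ++ [((r : Nat) : Int)] := by
      rw [← hstep]
      exact PySem.List.pyRange_one_succ_right (by positivity)
    rw [pvPrefix, hr, List.filter_append, List.length_append, ← pvPrefix, ih, pvCnt_succ]
    by_cases h : pvHit ((r : Nat) : Int) <;> simp [h]

theorem pvCnt_closed (m : Nat) : pvCnt m = (m / 100) * 61 + pvCnt (m % 100) := by
  induction m with
  | zero => simp [pvCnt]
  | succ m ih =>
    rcases Nat.lt_or_ge (m % 100) 99 with h | h
    · have h1 : (m + 1) / 100 = m / 100 := by omega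
      have h2 : (m + 1) % 100 = m % 100 + 1 := by omega
      rw [pvCnt_succ, ih, h1, h2, pvCnt_succ, pvHit_mod m]
      omega
    · have h99 : m % 100 = 99 := by omega
      have h1 : (m + 1) / 100 = m / 100 + 1 := by omega
      have h2 : (m + 1) % 100 = 0 := by omega
      have hc99 : pvCnt 99 = 60 := by decide
      have hc0 : pvCnt 0 = 0 := by decide
      have hh : pvHit ((99 : Nat) : Int) = true := by decide
      rw [pvCnt_succ, ih, h1, h2, hc0, h99, hc99, pvHit_mod m, h99, hh]
      simp only [if_pos trivial]
      omega

theorem pvFull_eq : pvFull = 61 := by decide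

-- A's fold over range n produces (0, cnt n, n - cnt n)
theorem pvFold_eq (n : Nat) :
    (PySem.List.pyRange 0 (n : Int) 1).foldl
      (fun (st : Int × Int × Int) i =>
        let confidence := PySem.Int.mod (i * 17 + 31) 100
        if confidence ≥ 70 then (st.1, st.2.1 + 1, st.2.2)
        else if confidence ≤ 30 then (st.1, st.2.1 + 1, st.2.2)
        else (st.1, st.2.1, st.2.2 + 1))
      ((0 : Int), (0 : Int), (0 : Int))
    = ((0 : Int), (pvCnt n : Int), (n : Int) - (pvCnt n : Int)) := by
  induction n with
  | zero => simp [pvCnt]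
  | succ n ih =>
    have hstep : ((n : Nat) : Int) + 1 = (((n + 1 : Nat)) : Int) := by push_cast; ring
    have hr : PySem.List.pyRange 0 (((n + 1 : Nat)) : Int) 1
        = PySem.List.pyRange 0 ((n : Nat) : Int) 1 ++ [((n : Nat) : Int)] := by
      rw [← hstep]
      exact PySem.List.pyRange_one_succ_right (by positivity)
    rw [hr, List.foldl_append, ih, List.foldl_cons, List.foldl_nil, pvCnt_succ]
    have hm : PySem.Int.mod (((n : Nat) : Int) * 17 + 31) 100
        = (((n : Nat) : Int) * 17 + 31) % 100 := PySem.Int.mod_eq_emod_of_pos (by norm_num)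
    show (if PySem.Int.mod (((n : Nat) : Int) * 17 + 31) 100 ≥ 70 then _
          else if PySem.Int.mod (((n : Nat) : Int) * 17 + 31) 100 ≤ 30 then _ else _) = _
    by_cases h70 : PySem.Int.mod (((n : Nat) : Int) * 17 + 31) 100 ≥ 70
    · have hb : pvHit ((n : Nat) : Int) = true := by
        simp only [pvHit]
        simp
        exact Or.inl (by omega)
      rw [if_pos h70, hb]
      simp only [if_pos trivial, Prod.mk.injEq]
      exact ⟨by trivial, by push_cast; ring, by push_cast; ring⟩
    · by_cases h30 : PySem.Int.mod (((n : Nat) : Int) * 17 + 31) 100 ≤ 30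
      · have hb : pvHit ((n : Nat) : Int) = true := by
          simp only [pvHit]
          simp
          exact Or.inr (by omega)
        rw [if_neg h70, if_pos h30, hb]
        simp only [if_pos trivial, Prod.mk.injEq]
        exact ⟨by trivial, by push_cast; ring, by push_cast; ring⟩
      · have hb : pvHit ((n : Nat) : Int) = false := by
          simp only [pvHit]
          simp
          omega
        rw [if_neg h70, if_neg h30, hb]
        simp only [Bool.false_eq_true, if_false, Prod.mk.injEq, Nat.add_zero]
        exact ⟨by trivial, by trivial, by push_cast; ring⟩

-- ===== VERDICT (by name: the statement is the Claim_ definition above) =====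
theorem ternary_decision_loop_spec : Claim_equal_ternary_decision_loop := by
  intro iterations _
  unfold Spec_ternary_decision_loop ternary_decision_loop ternary_decision_loop_alt
  by_cases hpos : iterations > 0
  · obtain ⟨n, rfl⟩ : ∃ n : Nat, iterations = (n : Int) :=
      ⟨iterations.toNat, (Int.toNat_of_nonneg (le_of_lt hpos)).symm⟩
    have hq : PySem.Int.floordiv (n : Int) 100 = ((n / 100 : Nat) : Int) := by
      exact_mod_cast PySem.Int.floordiv_natCast n 100
    have hr : PySem.Int.mod (n : Int) 100 = ((n % 100 : Nat) : Int) := by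
      exact_mod_cast PySem.Int.mod_natCast n 100
    rw [pvFold_eq, if_pos hpos]
    dsimp only
    rw [hq, hr]
    simp only [Int.toNat_natCast, pvFull_eq, pvPrefix_eq_cnt, List.cons.injEq, and_true]
    have hclosed := pvCnt_closed n
    refine ⟨?_, ⟨trivial, ?_⟩⟩ <;> push_cast <;> omega
  · have hle : iterations ≤ 0 := by omega
    simp only [hpos, PySem.List.pyRange_one_eq_nil hle, List.foldl_nil]
    norm_num [PySem.Int.floordiv, PySem.Int.mod, pvPrefix, PySem.List.pyRange_zero]
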